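-- pv_equiv track=rewrite | github.com/Z-Chen-NJU/Geant4-Agent | core/orchestrator/candidate_preprocess.py | _matches_explicit_target
-- ===== SOURCE A (Python) =====
-- def _matches_explicit_target(path: str, target_paths: list[str]) -> bool:
--     for target in target_paths:
--         if not isinstance(target, str) or not target:
--             continue
--         if "." not in target:
--             if path == target or path.startswith(target + "."):
--                 return True
--             continue
--         if path == target or path.startswith(target + "."):
--             return True
--     return False
-- ===== SOURCE B (Python) =====
-- def _matches_explicit_target(path: str, target_paths: list[str]) -> bool:
--     targets = {t for t in target_paths if isinstance(t, str) and t}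
--     if path in targets:
--         return True
--     for i, ch in enumerate(path):
--         if ch == '.' and path[:i] in targets:
--             return True
--     return False
-- ===== Notes on version B (the rewrite author's own statement) =====
-- stated objective: alternative
-- what changed: Instead of scanning every target and testing it against the path, B builds a set of the non-empty string targets once and checks the path itself and each of its dot-boundary prefixes for membership.
import Mathlib
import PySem

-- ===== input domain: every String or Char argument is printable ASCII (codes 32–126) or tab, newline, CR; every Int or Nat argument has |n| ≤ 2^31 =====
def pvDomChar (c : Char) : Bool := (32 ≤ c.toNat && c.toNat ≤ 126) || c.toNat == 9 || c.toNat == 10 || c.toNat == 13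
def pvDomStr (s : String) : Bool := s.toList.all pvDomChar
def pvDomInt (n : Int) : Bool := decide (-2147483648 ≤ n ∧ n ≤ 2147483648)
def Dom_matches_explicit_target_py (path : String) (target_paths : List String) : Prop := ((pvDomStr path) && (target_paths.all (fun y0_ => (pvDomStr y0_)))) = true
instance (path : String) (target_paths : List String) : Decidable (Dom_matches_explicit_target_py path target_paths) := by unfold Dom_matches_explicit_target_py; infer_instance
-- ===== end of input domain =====

-- B replaces A's scan over all targets by one membership test per dot-boundary prefix of the path
-- against a set of the non-empty targets built once (alternative decomposition; return value only).

-- ===== PORT A =====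
-- path == target or path.startswith(target + ".")
def pvAmatch (p t : List Char) : Bool :=
  p == t || PySem.Chars.startswith p (t ++ ['.'])

-- the for-loop over target_paths, with A's branch structure kept
def pvAloop (p : List Char) : List (List Char) → Bool
  | [] => false
  | t :: rest =>
    if t = [] then pvAloop p rest
    else if PySem.Chars.isIn ['.'] t = false then
      (if pvAmatch p t then true else pvAloop p rest)
    else
      (if pvAmatch p t then true else pvAloop p rest)

def matches_explicit_target_py (path : String) (target_paths : List String) : Bool :=
  pvAloop path.toList (target_paths.map String.toList)

-- ===== PORT B =====
-- for i, ch in enumerate(path): if ch == '.' and path[:i] in targets: return True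
def pvBloop (p : List Char) (S : PySem.Set (List Char)) : List (Int × Char) → Bool
  | [] => false
  | (i, ch) :: rest =>
    if ch = '.' ∧ PySem.Set.contains S (PySem.List.slice p none (some i)) then true
    else pvBloop p S rest

def matches_explicit_target_py_alt (path : String) (target_paths : List String) : Bool :=
  let S : PySem.Set (List Char) :=
    PySem.Set.ofList ((target_paths.map String.toList).filter (fun t => t ≠ []))
  let p := path.toList
  if PySem.Set.contains S p then true
  else pvBloop p S (PySem.List.enumerate p 0)

-- ===== PRECONDITION & SPEC =====
def Spec_matches_explicit_target_py (path : String) (target_paths : List String) (out : Bool) : Prop := out = matches_explicit_target_py_alt path target_paths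
instance (path : String) (target_paths : List String) (out : Bool) : Decidable (Spec_matches_explicit_target_py path target_paths out) := by unfold Spec_matches_explicit_target_py; infer_instance

-- ===== CLAIM (what is proved, stated in full; the proofs are below) =====
def Claim_equal_matches_explicit_target_py : Prop := ∀ (path : String) (target_paths : List String), Dom_matches_explicit_target_py path target_paths → Spec_matches_explicit_target_py path target_paths (matches_explicit_target_py path target_paths)

-- ===== LEMMAS AND PROOFS =====

-- A's loop returns true iff some non-empty target matches
theorem pvAloop_iff (p : List Char) (ts : List (List Char)) :
    pvAloop p ts = true ↔ ∃ t ∈ ts, t ≠ [] ∧ pvAmatch p t = true := by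
  induction ts with
  | nil => simp [pvAloop]
  | cons t rest ih =>
    simp only [pvAloop]
    split_ifs with h1 h2 h3 h4 <;> simp_all

-- B's loop returns true iff some enumerated dot position has its prefix in S
theorem pvBloop_iff (p : List Char) (S : PySem.Set (List Char)) (l : List (Int × Char)) :
    pvBloop p S l = true ↔
      ∃ x ∈ l, x.2 = '.' ∧ PySem.Set.contains S (PySem.List.slice p none (some x.1)) = true := by
  induction l with
  | nil => simp [pvBloop]
  | cons x rest ih =>
    obtain ⟨i, c⟩ := x
    simp only [pvBloop]
    split_ifs with h <;> simp_all

-- prefix-with-a-dot ↔ a dot position whose take equals t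
theorem prefix_dot_iff (p t : List Char) :
    (t ++ ['.']) <+: p ↔ ∃ k, ∃ _ : k < p.length, p[k] = '.' ∧ t = p.take k := by
  constructor
  · rintro ⟨u, hu⟩
    subst hu
    exact ⟨t.length, by simp, by simp, by simp⟩
  · rintro ⟨k, hk, hdot, ht⟩
    subst ht
    have h1 : p.take k ++ ['.'] = p.take (k + 1) := by
      rw [List.take_add_one]
      simp [List.getElem?_eq_getElem hk, hdot]
    rw [h1]
    exact List.take_prefix _ _

theorem pvAmatch_iff (p t : List Char) :
    pvAmatch p t = true ↔
      (t = p ∨ ∃ k, ∃ _ : k < p.length, p[k] = '.' ∧ t = p.take k) := by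
  simp only [pvAmatch, Bool.or_eq_true, beq_iff_eq, PySem.Chars.startswith_iff,
    prefix_dot_iff]
  tauto

-- ===== VERDICT (by name: the statement is the Claim_ definition above) =====
theorem matches_explicit_target_py_spec : Claim_equal_matches_explicit_target_py := by
  intro path target_paths _
  unfold Spec_matches_explicit_target_py matches_explicit_target_py
  have hcont : ∀ (ts : List (List Char)) (t : List Char),
      PySem.Set.contains (PySem.Set.ofList (ts.filter (fun t => t ≠ []))) t = true ↔
        t ∈ ts ∧ t ≠ [] := by
    intro ts t
    rw [PySem.Set.contains_iff]
    simp [PySem.Set.mem_ofList, List.mem_filter]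
  generalize hP : path.toList = p
  generalize hT : target_paths.map String.toList = ts
  have halt : matches_explicit_target_py_alt path target_paths =
      (if PySem.Set.contains (PySem.Set.ofList (ts.filter (fun t => t ≠ []))) p = true
        then true
        else pvBloop p (PySem.Set.ofList (ts.filter (fun t => t ≠ [])))
          (PySem.List.enumerate p 0)) := by
    rw [← hP, ← hT]; rfl
  rw [halt, Bool.eq_iff_iff, pvAloop_iff]
  constructor
  · rintro ⟨t, htmem, htne, hmatch⟩
    rcases (pvAmatch_iff p t).1 hmatch with h | ⟨k, hk, hdot, ht⟩
    · subst h
      rw [if_pos ((hcont _ _).2 ⟨htmem, htne⟩)]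
    · subst ht
      have hc := (hcont ts _).2 ⟨htmem, htne⟩
      split_ifs with h0
      · rfl
      rw [pvBloop_iff]
      refine ⟨((k : Int), p[k]), ?_, by simpa using hdot, ?_⟩
      · rw [PySem.List.mem_enumerate_iff]
        exact ⟨k, hk, by simp⟩
      · simpa [PySem.List.slice_to_natCast] using hc
  · intro hB
    split_ifs at hB with h0
    · obtain ⟨hmem, hne⟩ := (hcont ts p).1 h0
      exact ⟨p, hmem, hne, (pvAmatch_iff p p).2 (Or.inl rfl)⟩
    · rw [pvBloop_iff] at hB
      obtain ⟨⟨i, c⟩, hmeme, hdot, hcS⟩ := hB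
      rw [PySem.List.mem_enumerate_iff] at hmeme
      obtain ⟨k, hk, hpair⟩ := hmeme
      have hi : i = (k : Int) := by simpa using congrArg Prod.fst hpair
      have hc : c = p[k] := by simpa using congrArg Prod.snd hpair
      subst hi
      rw [PySem.List.slice_to_natCast] at hcS
      obtain ⟨hmem, hne⟩ := (hcont ts _).1 hcS
      refine ⟨p.take k, hmem, hne, (pvAmatch_iff p _).2 (Or.inr ⟨k, hk, ?_, rfl⟩)⟩
      simp only [hc] at hdot; exact hdot
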